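-- pv_equiv track=rewrite | github.com/incenger/dsa_practice | aoc/2022/17.py | get_rock
-- ===== SOURCE A (Python) =====
-- def get_rock(type, height):
--     # Get a rock with bottom at height
--     if type == 0:
--         # ooo
--         return set([(x, height) for x in range(2, 6)])
--     elif type == 1:
--         #  o
--         # ooo
--         #  o
--         return set(
--             [(x, height + 1) for x in range(2, 5)] + [(3, height), (3, height + 2)]
--         )
--     elif type == 2:
--         #   o
--         #   o
--         # ooo
--         return set(
--             [(x, height) for x in range(2, 5)]
--             + [(4, y) for y in range(height + 1, height + 3)]
--         )
--     elif type == 3: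
--         # o
--         # o
--         # o
--         # o
--         return set([(2, y) for y in range(height, height + 4)])
--     elif type == 4:
--         # oo
--         # oo
--         return set([(x, y) for x in range(2, 4) for y in range(height, height + 2)])
--     else:
--         raise ValueError("Invalid type", type)
-- ===== SOURCE B (Python) =====
-- # Each rock is drawn as a few line segments: (x0, dy0, dx, dy, n) places n cells
-- # starting at (x0, height + dy0) and stepping by (dx, dy).
-- SEGMENTS = {
--     0: [(2, 0, 1, 0, 4)],
--     1: [(2, 1, 1, 0, 3), (3, 0, 0, 2, 2)],
--     2: [(2, 0, 1, 0, 3), (4, 1, 0, 1, 2)],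
--     3: [(2, 0, 0, 1, 4)],
--     4: [(2, 0, 0, 1, 2), (3, 0, 0, 1, 2)],
-- }
--
--
-- def get_rock(type, height):
--     # Get a rock with bottom at height, by rasterising its segments
--     if type not in SEGMENTS:
--         raise ValueError("Invalid type", type)
--     rock = set()
--     for x0, dy0, dx, dy, n in SEGMENTS[type]:
--         for i in range(n):
--             rock.add((x0 + i * dx, height + dy0 + i * dy))
--     return rock
-- ===== Notes on version B (the rewrite author's own statement) =====
-- stated objective: alternative
-- what changed: B encodes each rock as line segments (start, step, length) and rasterises them with one generic nested loop, instead of A's five per-shape branches each building its own set comprehension.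
import Mathlib
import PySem

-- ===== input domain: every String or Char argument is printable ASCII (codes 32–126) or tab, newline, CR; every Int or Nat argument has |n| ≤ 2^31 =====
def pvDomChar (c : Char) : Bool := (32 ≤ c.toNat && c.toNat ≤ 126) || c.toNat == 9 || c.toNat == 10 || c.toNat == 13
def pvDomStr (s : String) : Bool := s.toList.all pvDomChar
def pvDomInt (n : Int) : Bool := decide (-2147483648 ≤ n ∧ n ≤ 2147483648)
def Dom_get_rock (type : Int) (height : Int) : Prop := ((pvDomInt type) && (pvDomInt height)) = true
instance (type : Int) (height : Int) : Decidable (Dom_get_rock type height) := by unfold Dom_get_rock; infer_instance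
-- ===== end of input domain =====

-- B rasterises each rock from a small table of line segments (start, step, length)
-- instead of A's five hand-written per-shape set comprehensions (alternative decomposition).
-- A raises ValueError for type outside 0..4; those inputs are excluded by Pre_get_rock.

-- ===== PORT A =====
def get_rock (type : Int) (height : Int) : List (Int × Int) :=
  if type == 0 then
    PySem.Set.ofList ((PySem.List.pyRange 2 6 1).map (fun x => (x, height)))
  else if type == 1 then
    PySem.Set.ofList ((PySem.List.pyRange 2 5 1).map (fun x => (x, height + 1))
      ++ [(3, height), (3, height + 2)])
  else if type == 2 then
    PySem.Set.ofList ((PySem.List.pyRange 2 5 1).map (fun x => (x, height))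
      ++ (PySem.List.pyRange (height + 1) (height + 3) 1).map (fun y => (4, y)))
  else if type == 3 then
    PySem.Set.ofList ((PySem.List.pyRange height (height + 4) 1).map (fun y => (2, y)))
  else if type == 4 then
    PySem.Set.ofList (((PySem.List.pyRange 2 4 1).map
      (fun x => (PySem.List.pyRange height (height + 2) 1).map (fun y => (x, y)))).flatten)
  else
    []  -- Python raises ValueError here; excluded by Pre_get_rock

-- ===== PORT B =====
-- segment = (x0, dy0, dx, dy, n): n cells from (x0, height + dy0) stepping by (dx, dy)
def SEGMENTS : PySem.Dict Int (List (Int × Int × Int × Int × Int)) :=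
  PySem.Dict.ofList
  [(0, [(2, 0, 1, 0, 4)]),
   (1, [(2, 1, 1, 0, 3), (3, 0, 0, 2, 2)]),
   (2, [(2, 0, 1, 0, 3), (4, 1, 0, 1, 2)]),
   (3, [(2, 0, 0, 1, 4)]),
   (4, [(2, 0, 0, 1, 2), (3, 0, 0, 1, 2)])]

def get_rock_alt (type : Int) (height : Int) : List (Int × Int) :=
  match PySem.Dict.get? SEGMENTS type with
  | none => []  -- Python raises ValueError here; excluded by Pre_get_rock
  | some segs =>
    segs.foldl (fun rock s =>
      (PySem.List.pyRange 0 s.2.2.2.2 1).foldl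
        (fun r i => PySem.Set.add r (s.1 + i * s.2.2.1, height + s.2.1 + i * s.2.2.2.1))
        rock)
      []

-- ===== PRECONDITION & SPEC =====
-- Exactly the inputs on which the Python A returns (otherwise it raises ValueError).
def Pre_get_rock (type : Int) (height : Int) : Prop := 0 ≤ type ∧ type ≤ 4
instance (type : Int) (height : Int) : Decidable (Pre_get_rock type height) := by unfold Pre_get_rock; infer_instance
def pvWitness_get_rock : Int × Int := (1, 0)

def Spec_get_rock (type : Int) (height : Int) (out : List (Int × Int)) : Prop := out = get_rock_alt type height
instance (type : Int) (height : Int) (out : List (Int × Int)) : Decidable (Spec_get_rock type height out) := by unfold Spec_get_rock; infer_instance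

-- ===== CLAIM (what is proved, stated in full; the proofs are below) =====
def Claim_equal_get_rock : Prop := ∀ (type : Int) (height : Int), Dom_get_rock type height → Pre_get_rock type height → Spec_get_rock type height (get_rock type height)

-- ===== LEMMAS AND PROOFS =====

-- ===== VERDICT (by name: the statement is the Claim_ definition above) =====
theorem get_rock_spec : Claim_equal_get_rock := by
  intro type height _ hpre
  unfold Spec_get_rock get_rock get_rock_alt
  have h5 : type = 0 ∨ type = 1 ∨ type = 2 ∨ type = 3 ∨ type = 4 := by
    rcases hpre with ⟨h1, h2⟩; omega
  have e1 : height + 1 ≠ height := by omega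
  have e2 : height + 2 ≠ height := by omega
  have e3 : height + 3 ≠ height := by omega
  have e21 : height + 2 ≠ height + 1 := by omega
  have e31 : height + 3 ≠ height + 1 := by omega
  have e32 : height + 3 ≠ height + 2 := by omega
  rcases h5 with h | h | h | h | h <;> subst h
  · rw [show PySem.Dict.get? SEGMENTS 0 = some [(2, 0, 1, 0, 4)] from by decide]
    simp [PySem.List.pyRange_one, List.range_succ, PySem.Set.ofList, PySem.Set.add,
      PySem.Set.contains]
  · rw [show PySem.Dict.get? SEGMENTS 1 = some [(2, 1, 1, 0, 3), (3, 0, 0, 2, 2)] from by decide]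
    simp [PySem.List.pyRange_one, List.range_succ, PySem.Set.ofList, PySem.Set.add,
      PySem.Set.contains, e2, e21]
  · rw [show PySem.Dict.get? SEGMENTS 2 = some [(2, 0, 1, 0, 3), (4, 1, 0, 1, 2)] from by decide]
    simp [PySem.List.pyRange_one, List.range_succ, PySem.Set.ofList, PySem.Set.add,
      PySem.Set.contains, e1]
  · rw [show PySem.Dict.get? SEGMENTS 3 = some [(2, 0, 0, 1, 4)] from by decide]
    simp [PySem.List.pyRange_one, List.range_succ, PySem.Set.ofList, PySem.Set.add,
      PySem.Set.contains, e1, e2, e3, e21, e31, e32]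
  · rw [show PySem.Dict.get? SEGMENTS 4 = some [(2, 0, 0, 1, 2), (3, 0, 0, 1, 2)] from by decide]
    simp [PySem.List.pyRange_one, List.range_succ, PySem.Set.ofList, PySem.Set.add,
      PySem.Set.contains, e1]
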